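-- pv_equiv track=rewrite | github.com/Ravenight13/tdd-orchestrator | src/tdd_orchestrator/decomposition/validation.py | sanitize_export_description
-- ===== SOURCE A (Python) =====
-- def sanitize_export_description(desc: str) -> str:
--     """Sanitize export description for safe use in prompts.
--
--     Removes shell metacharacters and limits length.
--
--     Args:
--         desc: Description to sanitize
--
--     Returns:
--         Sanitized description string
--     """
--     if not desc:
--         return ""
--
--     # Strip shell metacharacters
--     dangerous_chars = [";", "|", "&", "$", "(", ")", "<", ">", "`", "\\"]
--     for char in dangerous_chars:
--         desc = desc.replace(char, "")
--
--     # Limit length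
--     max_len = 1000
--     if len(desc) > max_len:
--         desc = desc[:max_len] + "..."
--
--     return desc.strip()
-- ===== SOURCE B (Python) =====
-- DANGEROUS = frozenset(';|&$()<>`\\')
--
--
-- def sanitize_export_description(desc: str) -> str:
--     """Sanitize export description: drop shell metacharacters in one pass, cap length."""
--     if not desc:
--         return ""
--     desc = "".join(c for c in desc if c not in DANGEROUS)
--     if len(desc) > 1000:
--         desc = desc[:1000] + "..."
--     return desc.strip()
-- ===== Notes on version B (the rewrite author's own statement) =====
-- stated objective: idiomatic
-- what changed: Replaces the ten sequential full-string replace() passes with a single character-level filtering pass against a frozenset of dangerous characters; truncation and strip are unchanged.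
import Mathlib
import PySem

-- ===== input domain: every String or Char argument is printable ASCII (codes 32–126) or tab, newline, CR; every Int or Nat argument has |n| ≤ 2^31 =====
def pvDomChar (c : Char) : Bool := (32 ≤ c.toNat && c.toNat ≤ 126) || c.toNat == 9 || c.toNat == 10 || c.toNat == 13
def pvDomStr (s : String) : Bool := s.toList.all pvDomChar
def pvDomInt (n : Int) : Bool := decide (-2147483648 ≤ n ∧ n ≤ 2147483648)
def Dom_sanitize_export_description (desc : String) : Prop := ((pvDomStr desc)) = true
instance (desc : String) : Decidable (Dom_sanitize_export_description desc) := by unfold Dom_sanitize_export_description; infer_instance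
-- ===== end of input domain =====

-- B replaces A's ten sequential replace() passes by a single character-filter pass (set membership); truncation and strip unchanged.


-- ===== PORT A =====
def sanitize_export_description (desc : String) : String :=
  let cs := desc.toList
  if cs = [] then ""
  else
    -- for char in dangerous_chars: desc = desc.replace(char, "")
    let dangerous : List (List Char) := [[';'],['|'],['&'],['$'],['('],[')'],['<'],['>'],['`'],['\\']]
    let cs1 := dangerous.foldl (fun d ch => PySem.Chars.replace d ch []) cs
    -- if len(desc) > 1000: desc = desc[:1000] + "..."
    let cs2 := if (1000 : Int) < PySem.Chars.len cs1
      then PySem.List.slice cs1 none (some 1000) ++ ['.', '.', '.'] else cs1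
    String.ofList (PySem.Chars.strip cs2)

-- ===== PORT B =====
def pvDangerous : PySem.Set Char := PySem.Set.ofList [';','|','&','$','(',')','<','>','`','\\']

def sanitize_export_description_alt (desc : String) : String :=
  let cs := desc.toList
  if cs = [] then ""
  else
    -- "".join(c for c in desc if c not in DANGEROUS)
    let kept := cs.filter (fun c => !pvDangerous.contains c)
    -- if len(desc) > 1000: desc = desc[:1000] + "..."
    let cs2 := if 1000 < kept.length then kept.take 1000 ++ ['.', '.', '.'] else kept
    String.ofList (PySem.Chars.strip cs2)

-- ===== PRECONDITION & SPEC =====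
def Spec_sanitize_export_description (desc : String) (out : String) : Prop := out = sanitize_export_description_alt desc
instance (desc : String) (out : String) : Decidable (Spec_sanitize_export_description desc out) := by unfold Spec_sanitize_export_description; infer_instance

-- ===== CLAIM (what is proved, stated in full; the proofs are below) =====
def Claim_equal_sanitize_export_description : Prop := ∀ (desc : String), Dom_sanitize_export_description desc → Spec_sanitize_export_description desc (sanitize_export_description desc)

-- ===== LEMMAS AND PROOFS =====

-- replace(d, c, "") removes every occurrence of the single character c: the fuel loop is a filter
lemma pv_go_filter (c : Char) : ∀ (l acc : List Char) (fuel : Nat), l.length ≤ fuel →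
    PySem.Chars.replace.go [c] [] fuel l acc = acc.reverse ++ l.filter (· != c) := by
  intro l
  induction l with
  | nil => intro acc fuel _; cases fuel <;> simp [PySem.Chars.replace.go]
  | cons a t ih =>
    intro acc fuel h
    cases fuel with
    | zero => simp at h
    | succ n =>
      simp only [PySem.Chars.replace.go, List.isPrefixOf, Bool.and_true]
      by_cases hca : c = a
      · subst hca
        simp only [beq_self_eq_true, if_true, List.length_cons, List.length_nil,
          List.drop_succ_cons, List.drop_zero, List.reverse_nil, List.nil_append]
        rw [ih acc n (by simpa using h)]
        simp
      · have hb : (c == a) = false := by simp [hca]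
        simp only [hb]
        rw [ih (a :: acc) n (by simpa using h)]
        simp [bne, Ne.symm hca]

lemma pv_replace_filter (s : List Char) (c : Char) :
    PySem.Chars.replace s [c] [] = s.filter (· != c) := by
  have := pv_go_filter c s [] s.length le_rfl
  simpa [PySem.Chars.replace] using this

-- A's ten replace passes compute B's single filter pass
lemma pv_fold_eq_filter (s : List Char) :
    [[';'],['|'],['&'],['$'],['('],[')'],['<'],['>'],['`'],['\\']].foldl
      (fun d ch => PySem.Chars.replace d ch []) s
    = s.filter (fun c => !pvDangerous.contains c) := by
  have hd : pvDangerous = [';','|','&','$','(',')','<','>','`','\\'] := by decide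
  simp only [List.foldl_cons, List.foldl_nil, pv_replace_filter, List.filter_filter]
  apply List.filter_congr
  intro c _
  simp only [hd, PySem.Set.contains, List.contains_cons, List.contains_nil,
    Bool.or_false, Bool.not_or, bne]
  ac_rfl

-- ===== VERDICT (by name: the statement is the Claim_ definition above) =====
theorem sanitize_export_description_spec : Claim_equal_sanitize_export_description := by
  intro desc _
  unfold Spec_sanitize_export_description sanitize_export_description sanitize_export_description_alt
  by_cases h : desc.toList = []
  · simp [h]
  · simp only [h, if_false, pv_fold_eq_filter]
    have hlen : ((1000 : Int) < PySem.Chars.len (desc.toList.filter (fun c => !pvDangerous.contains c)))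
        ↔ 1000 < (desc.toList.filter (fun c => !pvDangerous.contains c)).length := by
      rw [PySem.Chars.len_eq]; exact_mod_cast Iff.rfl
    have hsl : PySem.List.slice (desc.toList.filter (fun c => !pvDangerous.contains c)) none (some 1000)
        = (desc.toList.filter (fun c => !pvDangerous.contains c)).take 1000 := by
      rw [PySem.List.slice_to _ (by norm_num)]
      rfl
    rw [hsl, if_congr hlen rfl rfl]
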